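-- pv_equiv track=rewrite | github.com/idoerr/challenges | adventofcode2024/day7solution.py | recurse_operator_insert_part1
-- ===== SOURCE A (Python) =====
-- def recurse_operator_insert_part1(target, num_list):
--
--     if len(num_list) == 1:
--         yield num_list[0]
--     else:
--         for x in recurse_operator_insert_part1(target, num_list[0:-1]):
--             mod_num = num_list[-1] + x
--             if mod_num <= target:
--                 yield(mod_num)
--
--             mod_num = num_list[-1] * x
--             if mod_num <= target:
--                 yield(mod_num)
-- ===== SOURCE B (Python) =====
-- def recurse_operator_insert_part1(target, num_list):
--     # Iterative level-by-level rebuild instead of recursion on the prefix;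
--     # same emission order and per-step pruning.
--     current = [num_list[0]]
--     for n in num_list[1:]:
--         new = []
--         for x in current:
--             s = n + x
--             if s <= target:
--                 new.append(s)
--             p = n * x
--             if p <= target:
--                 new.append(p)
--         current = new
--     yield from current
-- ===== Notes on version B (the rewrite author's own statement) =====
-- stated objective: alternative
-- what changed: Replaces the recursion that peels the last element (nested generators, slicing num_list[0:-1] at every level) with a single left-to-right loop that rebuilds the candidate list level by level, preserving order and pruning.
import Mathlib
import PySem

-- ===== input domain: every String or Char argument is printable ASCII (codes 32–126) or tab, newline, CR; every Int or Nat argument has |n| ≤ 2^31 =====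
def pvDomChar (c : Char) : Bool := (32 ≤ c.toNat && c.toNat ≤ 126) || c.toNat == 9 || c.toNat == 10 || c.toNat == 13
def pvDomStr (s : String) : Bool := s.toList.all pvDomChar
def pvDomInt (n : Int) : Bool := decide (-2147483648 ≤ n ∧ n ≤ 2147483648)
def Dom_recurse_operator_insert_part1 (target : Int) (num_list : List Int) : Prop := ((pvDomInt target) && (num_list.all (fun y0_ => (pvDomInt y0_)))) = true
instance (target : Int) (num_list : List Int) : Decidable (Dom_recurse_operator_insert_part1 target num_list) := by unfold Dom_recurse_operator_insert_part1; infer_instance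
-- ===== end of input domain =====

-- B replaces A's recursion on the prefix (peeling the last element) with an iterative
-- left-to-right level-by-level rebuild; same values in the same order. Equivalence is
-- about the sequence of yielded values (both functions are generators).


-- ===== PORT A =====
-- Literal port of A: recursion on num_list[0:-1]; num_list[-1] combined with each
-- recursive value, yielding the sum then the product when ≤ target.
-- On [] Python recurses forever (RecursionError); Pre_ excludes it, the port returns [].
def recurse_operator_insert_part1 (target : Int) (num_list : List Int) : List Int :=
  match num_list with
  | [] => []
  | [a] => [a]
  | a :: b :: rest =>
      let l := a :: b :: rest
      let last := l.getLast!
      (recurse_operator_insert_part1 target l.dropLast).flatMap (fun x =>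
        (if last + x ≤ target then [last + x] else []) ++
        (if last * x ≤ target then [last * x] else []))
  termination_by num_list.length
  decreasing_by simp [List.length_dropLast]

-- ===== PORT B =====
-- Port of Source B: seed [num_list[0]], then for each later n rebuild the level with an
-- inner accumulator loop (append sum, then product, when ≤ target).
def recurse_operator_insert_part1_alt (target : Int) (num_list : List Int) : List Int :=
  match num_list with
  | [] => []  -- Source B raises IndexError here; excluded by Pre_
  | h :: t =>
      t.foldl (fun current n =>
        current.foldl (fun new x =>
          let new := if n + x ≤ target then new ++ [n + x] else new
          if n * x ≤ target then new ++ [n * x] else new) []) [h]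

-- ===== PRECONDITION & SPEC =====
-- Pre_ excludes the empty list, on which Python A recurses forever (RecursionError)
-- and Python B raises IndexError; A returns on every other input.
def Pre_recurse_operator_insert_part1 (target : Int) (num_list : List Int) : Prop := num_list ≠ []
instance (target : Int) (num_list : List Int) : Decidable (Pre_recurse_operator_insert_part1 target num_list) := by unfold Pre_recurse_operator_insert_part1; infer_instance
def pvWitness_recurse_operator_insert_part1 : Int × List Int := (10, [1, 2, 3])
def Spec_recurse_operator_insert_part1 (target : Int) (num_list : List Int) (out : List Int) : Prop := out = recurse_operator_insert_part1_alt target num_list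
instance (target : Int) (num_list : List Int) (out : List Int) : Decidable (Spec_recurse_operator_insert_part1 target num_list out) := by unfold Spec_recurse_operator_insert_part1; infer_instance

-- ===== CLAIM (what is proved, stated in full; the proofs are below) =====
def Claim_equal_recurse_operator_insert_part1 : Prop := ∀ (target : Int) (num_list : List Int), Dom_recurse_operator_insert_part1 target num_list → Pre_recurse_operator_insert_part1 target num_list → Spec_recurse_operator_insert_part1 target num_list (recurse_operator_insert_part1 target num_list)

-- ===== LEMMAS AND PROOFS =====

-- the per-value emission of both programs
def pvEmit (target n x : Int) : List Int :=
  (if n + x ≤ target then [n + x] else []) ++ (if n * x ≤ target then [n * x] else [])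

lemma getLast!_cons_concat : ∀ (l : List Int) (a n : Int), (a :: (l ++ [n])).getLast! = n := by
  intro l
  induction l with
  | nil => intro a n; rfl
  | cons b t ih =>
      intro a n
      simp only [List.cons_append]
      rw [show (a :: b :: (t ++ [n])).getLast! = (b :: (t ++ [n])).getLast! from rfl]
      exact ih b n

lemma dropLast_cons_concat : ∀ (l : List Int) (a n : Int), (a :: (l ++ [n])).dropLast = a :: l := by
  intro l
  induction l with
  | nil => intro a n; rfl
  | cons b t ih =>
      intro a n
      have := ih b n
      simp only [List.cons_append] at this ⊢
      rw [List.dropLast_cons_of_ne_nil (by simp), this]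

-- B's inner accumulator loop is init ++ flatMap of the emissions
lemma inner_foldl_eq (target n : Int) (cur init : List Int) :
    cur.foldl (fun new x =>
      let new := if n + x ≤ target then new ++ [n + x] else new
      if n * x ≤ target then new ++ [n * x] else new) init
    = init ++ cur.flatMap (pvEmit target n) := by
  induction cur generalizing init with
  | nil => simp
  | cons x xs ih =>
      simp only [List.foldl_cons, List.flatMap_cons, ih, pvEmit]
      split_ifs <;> simp

-- A on l ++ [n] (l nonempty) is one combining step applied to A on l
lemma recA_concat (target n : Int) (l : List Int) (hl : l ≠ []) :
    recurse_operator_insert_part1 target (l ++ [n])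
    = (recurse_operator_insert_part1 target l).flatMap (pvEmit target n) := by
  match l, hl with
  | [a], _ =>
      simp [recurse_operator_insert_part1, pvEmit]
  | a :: b :: rest, _ =>
      rw [show (a :: b :: rest) ++ [n] = a :: b :: (rest ++ [n]) by simp]
      rw [recurse_operator_insert_part1]
      rw [show a :: b :: (rest ++ [n]) = a :: ((b :: rest) ++ [n]) by simp]
      rw [getLast!_cons_concat, dropLast_cons_concat]
      rfl

-- main invariant: A on h :: t equals B's level fold
lemma recA_eq_fold (target h : Int) (t : List Int) :
    recurse_operator_insert_part1 target (h :: t)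
    = t.foldl (fun current n => current.flatMap (pvEmit target n)) [h] := by
  induction t using List.reverseRecOn with
  | nil => simp [recurse_operator_insert_part1]
  | append_singleton s n ih =>
      rw [show h :: (s ++ [n]) = (h :: s) ++ [n] by simp,
          recA_concat target n (h :: s) (by simp), ih]
      simp

-- ===== VERDICT (by name: the statement is the Claim_ definition above) =====
theorem recurse_operator_insert_part1_spec : Claim_equal_recurse_operator_insert_part1 := by
  intro target num_list _ hpre
  unfold Spec_recurse_operator_insert_part1
  match num_list, hpre with
  | h :: t, _ =>
      rw [recurse_operator_insert_part1_alt, recA_eq_fold]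
      exact PySem.List.foldl_congr_mem t _ _ [h]
        (fun cur n _ => by rw [inner_foldl_eq]; simp)
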